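-- pv_equiv track=rewrite | github.com/WENHUAN22/5mC_pred | script/utils.py | kmer_permutation
-- ===== SOURCE A (Python) =====
-- def kmer_permutation(list_):
--     res = []
--     for i in list_:
--         for j in list_:
--             for k in list_:
--                 ele = f'{i}{j}{k}'
--                 res.append(ele)
--     return res
-- ===== SOURCE B (Python) =====
-- def kmer_permutation(list_):
--     res = ['']
--     for _ in range(3):
--         res = [p + str(c) for p in res for c in list_]
--     return res
-- ===== Notes on version B (the rewrite author's own statement) =====
-- stated objective: simpler
-- what changed: Replaces the three hard-coded nested loops by one incremental loop that runs three rounds, each extending every prefix by every element, producing the same order.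
import Mathlib
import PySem

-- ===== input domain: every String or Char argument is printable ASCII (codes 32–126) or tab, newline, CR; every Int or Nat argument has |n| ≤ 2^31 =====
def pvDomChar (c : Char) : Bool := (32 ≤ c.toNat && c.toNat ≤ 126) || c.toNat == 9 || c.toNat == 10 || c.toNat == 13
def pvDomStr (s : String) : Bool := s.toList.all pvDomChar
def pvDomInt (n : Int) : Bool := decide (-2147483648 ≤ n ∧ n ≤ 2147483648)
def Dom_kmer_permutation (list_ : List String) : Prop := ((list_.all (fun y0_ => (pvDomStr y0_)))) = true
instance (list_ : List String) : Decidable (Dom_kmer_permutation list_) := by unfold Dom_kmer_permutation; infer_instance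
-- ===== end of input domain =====

-- B builds the 3-mers incrementally (res = [''] grown three rounds) instead of three fixed nested loops; objective: simpler.


-- ===== PORT A =====
def kmer_permutation (list_ : List String) : List String :=
  list_.foldl (fun res i =>
    list_.foldl (fun res j =>
      list_.foldl (fun res k => res ++ [i ++ j ++ k]) res) res) []

-- ===== PORT B =====
-- B: res = [''], then three rounds of res = [p + c for p in res for c in list_]
def kmerStep (list_ res : List String) : List String :=
  res.flatMap (fun p => list_.map (fun c => p ++ c))

def kmer_permutation_alt (list_ : List String) : List String :=
  kmerStep list_ (kmerStep list_ (kmerStep list_ [""]))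

-- ===== PRECONDITION & SPEC =====
def Spec_kmer_permutation (list_ : List String) (out : List String) : Prop := out = kmer_permutation_alt list_
instance (list_ : List String) (out : List String) : Decidable (Spec_kmer_permutation list_ out) := by unfold Spec_kmer_permutation; infer_instance

-- ===== CLAIM (what is proved, stated in full; the proofs are below) =====
def Claim_equal_kmer_permutation : Prop := ∀ (list_ : List String), Dom_kmer_permutation list_ → Spec_kmer_permutation list_ (kmer_permutation list_)

-- ===== LEMMAS AND PROOFS =====

-- ===== VERDICT (by name: the statement is the Claim_ definition above) =====
theorem flatten_map_singleton {α β : Type} (f : α → β) (l : List α) :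
    (l.map (fun x => [f x])).flatten = l.map f := by
  induction l with
  | nil => rfl
  | cons a t ih => simp [ih]

theorem kmer_permutation_spec : Claim_equal_kmer_permutation := by
  intro list_ _
  show kmer_permutation list_ = kmer_permutation_alt list_
  unfold kmer_permutation kmer_permutation_alt kmerStep
  simp [List.flatMap_def, List.map_map, Function.comp_def,
    flatten_map_singleton, String.append_assoc, List.flatten_flatten]
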